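-- pv_equiv track=rewrite | github.com/rashevzarko-crypto/NBU-ASRS | scripts/glm5_deepinfra.py | _normalize_parent
-- ===== SOURCE A (Python) =====
-- def _normalize_parent(items: list, cat_lower: dict[str, str]) -> list[str]:
--     """Map parsed items to exact parent category names."""
--     result = []
--     seen = set()
--     for item in items:
--         if not isinstance(item, str):
--             continue
--         key = item.strip().lower()
--         if key in cat_lower:
--             cat = cat_lower[key]
--             if cat not in seen:
--                 result.append(cat)
--                 seen.add(cat)
--             continue
--         # Strip subcategory suffix
--         if ":" in key:
--             prefix = key.split(":")[0].strip()
--             if prefix in cat_lower: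
--                 cat = cat_lower[prefix]
--                 if cat not in seen:
--                     result.append(cat)
--                     seen.add(cat)
--     return result
-- ===== SOURCE B (Python) =====
-- def _resolve(item, cat_lower):
--     """Resolve one item to its parent category name, or None."""
--     if not isinstance(item, str):
--         return None
--     key = item.strip().lower()
--     if key in cat_lower:
--         return cat_lower[key]
--     if ":" in key:
--         prefix = key.split(":")[0].strip()
--         if prefix in cat_lower:
--             return cat_lower[prefix]
--     return None
--
--
-- def _normalize_parent(items: list, cat_lower: dict[str, str]) -> list[str]:
--     """Map parsed items to exact parent category names."""
--     resolved = [_resolve(item, cat_lower) for item in items]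
--     # For each distinct category name, find the first item that resolves to it,
--     # then emit the categories in order of that first position.
--     pairs = []
--     for cat in dict.fromkeys(cat_lower.values()):
--         try:
--             pairs.append((resolved.index(cat), cat))
--         except ValueError:
--             pass
--     pairs.sort(key=lambda p: p[0])
--     return [cat for _, cat in pairs]
-- ===== Notes on version B (the rewrite author's own statement) =====
-- stated objective: alternative
-- what changed: Instead of A's single interleaved pass that threads a result list and a seen-set, B resolves all items once, then iterates over the DISTINCT CATEGORY NAMES, locating for each its first resolved position with list.index, and finally sorts the (position, name) pairs by position; correct because first-seen output order is exactly ascending order of first occurrence positions.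
import Mathlib
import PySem

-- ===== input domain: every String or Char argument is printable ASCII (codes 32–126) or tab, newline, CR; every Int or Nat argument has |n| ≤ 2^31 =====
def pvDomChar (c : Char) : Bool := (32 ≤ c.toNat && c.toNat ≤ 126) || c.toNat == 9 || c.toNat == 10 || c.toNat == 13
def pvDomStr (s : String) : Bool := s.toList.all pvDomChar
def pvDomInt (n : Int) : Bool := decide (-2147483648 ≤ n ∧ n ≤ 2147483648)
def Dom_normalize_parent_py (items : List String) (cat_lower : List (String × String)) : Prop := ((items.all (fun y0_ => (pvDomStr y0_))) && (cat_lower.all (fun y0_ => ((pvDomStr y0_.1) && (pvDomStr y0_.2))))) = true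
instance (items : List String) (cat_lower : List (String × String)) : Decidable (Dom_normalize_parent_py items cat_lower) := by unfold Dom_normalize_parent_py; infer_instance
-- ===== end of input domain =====

-- B replaces A's interleaved map+dedup pass (result list threaded with a seen-set) by a different
-- algorithm: resolve every item once, then for each DISTINCT category name locate the first resolved
-- position with list.index, and sort the (position, name) pairs by position; same answer because
-- first-seen output order is exactly ascending order of first occurrence positions.
-- Since `items : List String`, Python's `isinstance(item, str)` check is always true and is dropped in both ports.

-- ===== PORT A =====
-- A's loop body (verbatim), on the state (result, seen). `key.split(":")[0]` is exact via
-- pyGetD 0 "" because split with a non-empty separator always returns a non-empty list.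
def npStepA (cat_lower : List (String × String)) (st : List String × PySem.Set String)
    (item : String) : List String × PySem.Set String :=
  let key := PySem.Str.lower (PySem.Str.strip item)
  match (PySem.Dict.mk cat_lower).get? key with
  | some cat =>
      if PySem.Set.contains st.2 cat then st
      else (st.1 ++ [cat], PySem.Set.add st.2 cat)
  | none =>
      if PySem.Str.isIn ":" key then
        let pre := PySem.Str.strip (PySem.List.pyGetD ((PySem.Str.split? key ":").getD []) 0 "")
        match (PySem.Dict.mk cat_lower).get? pre with
        | some cat =>
            if PySem.Set.contains st.2 cat then st
            else (st.1 ++ [cat], PySem.Set.add st.2 cat)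
        | none => st
      else st

def normalize_parent_py (items : List String) (cat_lower : List (String × String)) : List String :=
  (items.foldl (npStepA cat_lower) ([], PySem.Set.empty)).1

-- ===== PORT B =====
-- B's helper: resolve one item to its parent category name, or none.
def npResolve (cat_lower : List (String × String)) (item : String) : Option String :=
  let key := PySem.Str.lower (PySem.Str.strip item)
  match (PySem.Dict.mk cat_lower).get? key with
  | some c => some c
  | none =>
      if PySem.Str.isIn ":" key then
        let pre := PySem.Str.strip (PySem.List.pyGetD ((PySem.Str.split? key ":").getD []) 0 "")
        (PySem.Dict.mk cat_lower).get? pre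
      else none

-- resolved list, then per distinct category name its first position via list.index
-- (the try/except ValueError skip is `index?`'s none branch of the filterMap), then sort by position.
def normalize_parent_py_alt (items : List String) (cat_lower : List (String × String)) : List String :=
  (PySem.List.sorted
    ((PySem.List.dedup ((PySem.Dict.mk cat_lower).values)).filterMap
      (fun cat =>
        (PySem.List.index? (items.map (fun item => npResolve cat_lower item)) (some cat)).map
          (fun i => (i, cat))))
    (fun p => p.1)).map (fun p => p.2)

-- ===== PRECONDITION & SPEC =====
def Spec_normalize_parent_py (items : List String) (cat_lower : List (String × String)) (out : List String) : Prop := out = normalize_parent_py_alt items cat_lower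
instance (items : List String) (cat_lower : List (String × String)) (out : List String) : Decidable (Spec_normalize_parent_py items cat_lower out) := by unfold Spec_normalize_parent_py; infer_instance

-- ===== CLAIM (what is proved, stated in full; the proofs are below) =====
def Claim_equal_normalize_parent_py : Prop := ∀ (items : List String) (cat_lower : List (String × String)), Dom_normalize_parent_py items cat_lower → Spec_normalize_parent_py items cat_lower (normalize_parent_py items cat_lower)

-- ===== LEMMAS AND PROOFS =====

-- A's per-item step, on a state whose two components are equal, keeps them equal and
-- acts as "add the resolved category (if any) to the set".
lemma npStep_eq (cat_lower : List (String × String)) (s : PySem.Set String) (item : String) :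
    npStepA cat_lower (s, s) item
    = (match npResolve cat_lower item with
       | some c => (PySem.Set.add s c, PySem.Set.add s c)
       | none => (s, s)) := by
  simp only [npStepA, npResolve]
  cases h1 : (PySem.Dict.mk cat_lower).get? (PySem.Str.lower (PySem.Str.strip item)) with
  | some c =>
      by_cases hc : c ∈ s
      · simp [PySem.Set.add, PySem.Set.contains, hc]
      · simp [PySem.Set.add, PySem.Set.contains, hc]
  | none =>
      by_cases hin : PySem.Str.isIn ":" (PySem.Str.lower (PySem.Str.strip item)) = true
      · rw [if_pos hin, if_pos hin]
        cases h2 : (PySem.Dict.mk cat_lower).get?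
            (PySem.Str.strip (PySem.List.pyGetD
              ((PySem.Str.split? (PySem.Str.lower (PySem.Str.strip item)) ":").getD []) 0 "")) with
        | some c =>
            by_cases hc : c ∈ s
            · simp [PySem.Set.add, PySem.Set.contains, hc]
            · simp [PySem.Set.add, PySem.Set.contains, hc]
        | none => rfl
      · rw [if_neg hin, if_neg hin]

-- The whole fold, started on a duplicated state, stays duplicated and equals
-- folding Set.add over the resolved categories.
lemma npFold_eq (cat_lower : List (String × String)) (items : List String) (s : PySem.Set String) :
    items.foldl (npStepA cat_lower) (s, s)
    = (let t := ((items.map (fun item => npResolve cat_lower item)).filterMap id).foldl PySem.Set.add s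
       (t, t)) := by
  induction items generalizing s with
  | nil => rfl
  | cons x xs ih =>
      rw [List.foldl_cons, npStep_eq cat_lower s x]
      cases h : npResolve cat_lower x with
      | some c => simpa [h] using ih (PySem.Set.add s c)
      | none => simpa [h] using ih s

-- Folding Set.add from any accumulator appends the not-yet-seen part of the dedup.
lemma foldl_add_split (xs acc : List String) :
    xs.foldl PySem.Set.add acc
    = acc ++ (PySem.Set.ofList xs).filter (fun y => !acc.contains y) := by
  induction xs generalizing acc with
  | nil => simp [PySem.Set.ofList, PySem.Set.empty]
  | cons a xs ih =>
      have hofl : PySem.Set.ofList (a :: xs) = xs.foldl PySem.Set.add [a] := by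
        simp [PySem.Set.ofList, PySem.Set.empty, PySem.Set.add, PySem.Set.contains]
      rw [List.foldl_cons]
      by_cases h : a ∈ acc
      · have hadd : PySem.Set.add acc a = acc := by
          simp [PySem.Set.add, PySem.Set.contains, h]
        rw [hadd, ih, hofl, ih [a]]
        simp only [List.filter_append, List.filter_filter]
        have : List.filter (fun y => !acc.contains y) [a] = [] := by
          simp [h]
        rw [this]
        simp only [List.nil_append]
        congr 1
        apply List.filter_congr
        intro y _
        by_cases hya : y = a
        · subst hya; simp [h]
        · simp [hya]
      · have hadd : PySem.Set.add acc a = acc ++ [a] := by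
          simp [PySem.Set.add, PySem.Set.contains, h]
        rw [hadd, ih, hofl, ih [a]]
        have : List.filter (fun y => !acc.contains y) [a] = [a] := by simp [h]
        simp only [List.filter_append, List.filter_filter, this, List.append_assoc]
        congr 2
        apply List.filter_congr
        intro y _
        by_cases hya : y = a
        · subst hya; simp
        · simp [hya]

-- Python's ordered dedup, unfolded one step.
lemma dedup_cons (x : String) (xs : List String) :
    PySem.List.dedup (x :: xs)
    = x :: (PySem.List.dedup xs).filter (fun y => !(y == x)) := by
  rw [PySem.List.dedup_eq_ofList, PySem.List.dedup_eq_ofList]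
  have h0 : PySem.Set.ofList (x :: xs) = xs.foldl PySem.Set.add [x] := by
    simp [PySem.Set.ofList, PySem.Set.empty, PySem.Set.add, PySem.Set.contains]
  rw [h0, foldl_add_split]
  simp only [List.singleton_append, List.cons.injEq, true_and]
  apply List.filter_congr
  intro y _
  by_cases hxy : x = y
  · simp [hxy]
  · simp [Ne.symm hxy]

-- The first positions (in the resolved list) of the distinct resolved categories,
-- read off in first-seen order, are strictly increasing.
lemma pairwise_idx (L : List (Option String)) :
    (PySem.List.dedup (L.filterMap id)).Pairwise
      (fun a b => (PySem.List.index? L (some a)).getD 0 < (PySem.List.index? L (some b)).getD 0) := by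
  induction L with
  | nil => simp [PySem.List.dedup, PySem.Set.ofList, PySem.Set.empty]
  | cons o L ih =>
      have hmem : ∀ c, c ∈ PySem.List.dedup (L.filterMap id) → some c ∈ L := by
        intro c hc
        rw [PySem.List.dedup_eq_ofList, PySem.Set.mem_ofList] at hc
        rcases List.mem_filterMap.mp hc with ⟨o', ho', hid⟩
        exact hid ▸ ho'
      cases o with
      | none =>
          have e : List.filterMap id (none :: L) = List.filterMap id L := rfl
          rw [e]
          refine ih.imp_of_mem ?_
          intro a b ha hb hab
          rcases Option.isSome_iff_exists.mp ((PySem.List.index?_isSome_iff L (some a)).mpr (hmem a ha)) with ⟨i, hi⟩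
          rcases Option.isSome_iff_exists.mp ((PySem.List.index?_isSome_iff L (some b)).mpr (hmem b hb)) with ⟨j, hj⟩
          rw [PySem.List.index?_cons_of_ne L (Option.some_ne_none a).symm,
              PySem.List.index?_cons_of_ne L (Option.some_ne_none b).symm, hi, hj]
          rw [hi, hj] at hab
          simpa using Nat.add_lt_add_right (by simpa using hab) 1
      | some c =>
          have e : List.filterMap id (some c :: L) = c :: List.filterMap id L := rfl
          rw [e]
          rw [dedup_cons]
          constructor
          · intro b hb
            have hbd := List.mem_of_mem_filter hb
            have hbne : b ≠ c := by
              have := List.of_mem_filter hb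
              simp only [Bool.not_eq_eq_eq_not, Bool.not_true, beq_eq_false_iff_ne, ne_eq] at this
              exact this
            rcases Option.isSome_iff_exists.mp ((PySem.List.index?_isSome_iff L (some b)).mpr (hmem b hbd)) with ⟨j, hj⟩
            rw [PySem.List.index?_cons_self, PySem.List.index?_cons_of_ne L
              (fun hcb => hbne (Option.some.inj hcb).symm), hj]
            simp
          · refine ((ih.sublist List.filter_sublist).imp_of_mem ?_)
            intro a b ha hb hab
            have had := List.mem_of_mem_filter ha
            have hbd := List.mem_of_mem_filter hb
            have hane : a ≠ c := by
              have := List.of_mem_filter ha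
              simp only [Bool.not_eq_eq_eq_not, Bool.not_true, beq_eq_false_iff_ne, ne_eq] at this
              exact this
            have hbne : b ≠ c := by
              have := List.of_mem_filter hb
              simp only [Bool.not_eq_eq_eq_not, Bool.not_true, beq_eq_false_iff_ne, ne_eq] at this
              exact this
            rcases Option.isSome_iff_exists.mp ((PySem.List.index?_isSome_iff L (some a)).mpr (hmem a had)) with ⟨i, hi⟩
            rcases Option.isSome_iff_exists.mp ((PySem.List.index?_isSome_iff L (some b)).mpr (hmem b hbd)) with ⟨j, hj⟩
            rw [PySem.List.index?_cons_of_ne L (fun hca => hane (Option.some.inj hca).symm),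
                PySem.List.index?_cons_of_ne L (fun hcb => hbne (Option.some.inj hcb).symm), hi, hj]
            rw [hi, hj] at hab
            simpa using Nat.add_lt_add_right (by simpa using hab) 1

-- Every category npResolve produces is a value of the dict.
lemma npResolve_mem_values (cat_lower : List (String × String)) (item : String) (c : String)
    (h : npResolve cat_lower item = some c) : c ∈ (PySem.Dict.mk cat_lower).values := by
  simp only [npResolve] at h
  cases h1 : (PySem.Dict.mk cat_lower).get? (PySem.Str.lower (PySem.Str.strip item)) with
  | some c' =>
      rw [h1] at h
      cases h
      exact List.mem_map.mpr ⟨_, PySem.Dict.mem_items_of_get?_eq_some _ h1, rfl⟩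
  | none =>
      rw [h1] at h
      by_cases hin : PySem.Str.isIn ":" (PySem.Str.lower (PySem.Str.strip item)) = true
      · rw [if_pos hin] at h
        exact List.mem_map.mpr ⟨_, PySem.Dict.mem_items_of_get?_eq_some _ h, rfl⟩
      · rw [if_neg hin] at h; cases h

-- filterMap of "first index, if any" is a map over the filter keeping the found ones.
lemma filterMap_idx_eq (R : List (Option String)) (W : List String) :
    W.filterMap (fun cat => (PySem.List.index? R (some cat)).map (fun i => (i, cat)))
    = (W.filter (fun cat => (PySem.List.index? R (some cat)).isSome)).map
        (fun cat => ((PySem.List.index? R (some cat)).getD 0, cat)) := by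
  induction W with
  | nil => rfl
  | cons w W ih =>
      cases h : PySem.List.index? R (some w) with
      | some i =>
          simp only [List.filterMap_cons, List.filter_cons, h, Option.map_some, Option.isSome_some,
            if_true, List.map_cons, Option.getD_some, ih]
      | none =>
          simp only [List.filterMap_cons, List.filter_cons, h, Option.map_none, Option.isSome_none,
            Bool.false_eq_true, if_false, ih]

-- ===== VERDICT (by name: the statement is the Claim_ definition above) =====
theorem normalize_parent_py_spec : Claim_equal_normalize_parent_py := by
  intro items cat_lower _
  show normalize_parent_py items cat_lower = normalize_parent_py_alt items cat_lower
  set R := items.map (fun item => npResolve cat_lower item) with hR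
  set M := R.filterMap id with hM
  set D := PySem.List.dedup M with hD
  -- A's side is the ordered dedup of the resolved categories
  have hA : normalize_parent_py items cat_lower = D := by
    unfold normalize_parent_py
    show (items.foldl (npStepA cat_lower) (PySem.Set.empty, PySem.Set.empty)).1 = D
    rw [npFold_eq]
    rw [hD, PySem.List.dedup_eq_ofList]
    rfl
  -- D's members are exactly the produced categories, and they are dict values
  have hmemM : ∀ c, c ∈ D ↔ some c ∈ R := by
    intro c
    rw [hD, PySem.List.dedup_eq_ofList, PySem.Set.mem_ofList, hM]
    constructor
    · intro hc; rcases List.mem_filterMap.mp hc with ⟨o, ho, hid⟩; exact hid ▸ ho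
    · intro hc; exact List.mem_filterMap.mpr ⟨some c, hc, rfl⟩
  have hcov : ∀ c, some c ∈ R → c ∈ (PySem.Dict.mk cat_lower).values := by
    intro c hc
    rcases List.mem_map.mp (hR ▸ hc) with ⟨item, _, hres⟩
    exact npResolve_mem_values cat_lower item c hres
  -- B's pairs, rewritten as a map over a filter
  unfold normalize_parent_py_alt
  rw [← hR, filterMap_idx_eq R]
  set q : String → Bool := fun cat => (PySem.List.index? R (some cat)).isSome with hq
  set h : String → Nat × String := fun cat => ((PySem.List.index? R (some cat)).getD 0, cat) with hh
  -- the sorted pairs are exactly D annotated with its (strictly increasing) first positions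
  have hperm : (D.map h).Perm
      (((PySem.List.dedup ((PySem.Dict.mk cat_lower).values)).filter q).map h) := by
    refine List.Perm.map h ?_
    rw [List.perm_ext_iff_of_nodup
      (by rw [hD, PySem.List.dedup_eq_ofList]; exact PySem.Set.nodup_ofList _)
      (List.Nodup.filter q (by rw [PySem.List.dedup_eq_ofList]; exact PySem.Set.nodup_ofList _))]
    intro c
    rw [List.mem_filter, hmemM c, PySem.List.dedup_eq_ofList, PySem.Set.mem_ofList]
    constructor
    · intro hc
      exact ⟨hcov c hc, by rw [hq]; exact (PySem.List.index?_isSome_iff R (some c)).mpr hc⟩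
    · intro hcq
      exact (PySem.List.index?_isSome_iff R (some c)).mp hcq.2
  have hpw : (D.map h).Pairwise (fun p p' => p.1 < p'.1) := by
    rw [List.pairwise_map]
    rw [hh]
    have := pairwise_idx R
    rw [← hM, ← hD] at this
    exact this
  rw [PySem.List.sorted_eq_of_perm_of_pairwise_lt _ (D.map h) (fun p => p.1) hperm hpw]
  rw [hA, List.map_map]
  have : ((fun p : Nat × String => p.2) ∘ h) = fun c => c := by
    funext c; rfl
  rw [this, List.map_id']
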